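-- pv_equiv track=rewrite | github.com/dmedlin87/nashville-numbers | src/nashville_numbers/voicing.py | _voice_leading_cost
-- ===== SOURCE A (Python) =====
-- def _voice_leading_cost(prev: list[int], next_: list[int]) -> int:
--     """Total absolute semitone movement between two voicings."""
--     if not prev or not next_:
--         return 0
--     if len(prev) == len(next_):
--         return sum(abs(a - b) for a, b in zip(sorted(prev), sorted(next_)))
--     shorter, longer = (prev, next_) if len(prev) <= len(next_) else (next_, prev)
--     total = 0
--     for note in shorter:
--         closest = min(longer, key=lambda n: abs(n - note))
--         total += abs(note - closest)
--     return total
-- ===== SOURCE B (Python) =====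
-- def _bisect_left(a, x):
--     lo, hi = 0, len(a)
--     while lo < hi:
--         mid = (lo + hi) // 2
--         if a[mid] < x:
--             lo = mid + 1
--         else:
--             hi = mid
--     return lo
--
--
-- def _voice_leading_cost(prev: list[int], next_: list[int]) -> int:
--     """Total absolute semitone movement between two voicings."""
--     if not prev or not next_:
--         return 0
--     if len(prev) == len(next_):
--         return sum(abs(a - b) for a, b in zip(sorted(prev), sorted(next_)))
--     shorter, longer = (prev, next_) if len(prev) <= len(next_) else (next_, prev)
--     L = sorted(longer)
--     total = 0
--     for note in shorter:
--         i = _bisect_left(L, note)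
--         d = None
--         if i < len(L):
--             d = L[i] - note
--         if i > 0 and (d is None or note - L[i - 1] < d):
--             d = note - L[i - 1]
--         total += d
--     return total
-- ===== Notes on version B (the rewrite author's own statement) =====
-- stated objective: alternative
-- what changed: For unequal-length voicings, the per-note linear nearest-note scan over `longer` is replaced by sorting `longer` once and locating each note's nearest neighbour with a hand-written binary search (bisect_left) on the sorted list; it trades the simple scan for a sort plus binary searches.
import Mathlib
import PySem

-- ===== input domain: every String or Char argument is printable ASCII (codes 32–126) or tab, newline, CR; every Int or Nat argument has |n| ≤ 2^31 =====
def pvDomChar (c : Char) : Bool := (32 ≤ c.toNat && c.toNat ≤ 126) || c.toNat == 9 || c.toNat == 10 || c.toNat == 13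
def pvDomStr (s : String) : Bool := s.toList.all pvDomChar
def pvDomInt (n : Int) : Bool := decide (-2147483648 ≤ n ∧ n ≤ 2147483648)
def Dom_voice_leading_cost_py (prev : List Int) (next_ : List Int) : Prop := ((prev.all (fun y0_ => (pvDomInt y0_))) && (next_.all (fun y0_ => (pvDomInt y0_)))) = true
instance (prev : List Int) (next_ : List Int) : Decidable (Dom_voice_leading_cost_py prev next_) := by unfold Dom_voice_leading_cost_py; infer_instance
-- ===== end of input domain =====

-- B replaces A's per-note linear nearest scan over `longer` with one sort of `longer`
-- plus a binary search (bisect_left) per note; objective: alternative algorithm, same result.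

-- ===== PORT A =====
def voice_leading_cost_py (prev : List Int) (next_ : List Int) : Int :=
  if prev = [] ∨ next_ = [] then 0
  else if prev.length = next_.length then
    (List.zip (PySem.List.sorted prev (fun x => x) false)
              (PySem.List.sorted next_ (fun x => x) false)).foldl
      (fun s p => s + |p.1 - p.2|) 0
  else
    let sl := if prev.length ≤ next_.length then (prev, next_) else (next_, prev)
    sl.1.foldl (fun total note =>
      match PySem.List.min? sl.2 (fun n => |n - note|) with
      | some closest => total + |note - closest|
      | none => total) 0   -- none unreachable: `longer` is nonempty here (Python min([]) would raise)

-- ===== PORT B =====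
-- nearest distance of `note` to the sorted list L via bisect_left (Source B's hand-written
-- _bisect_left is Python's standard binary-search loop; PySem.List.bisectLeft is that loop)
def nearestDist (L : List Int) (note : Int) : Int :=
  let i := PySem.List.bisectLeft L note
  let d0 : Option Int := if i < L.length then some (L.getD i 0 - note) else none
  let d1 : Option Int :=
    if 0 < i && (match d0 with | none => true | some dv => decide (note - L.getD (i - 1) 0 < dv))
    then some (note - L.getD (i - 1) 0) else d0
  d1.getD 0   -- none unreachable: L is nonempty at every call site (Python would raise on `total += None`)

def voice_leading_cost_py_alt (prev : List Int) (next_ : List Int) : Int :=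
  if prev = [] ∨ next_ = [] then 0
  else if prev.length = next_.length then
    (List.zip (PySem.List.sorted prev (fun x => x) false)
              (PySem.List.sorted next_ (fun x => x) false)).foldl
      (fun s p => s + |p.1 - p.2|) 0
  else
    let sl := if prev.length ≤ next_.length then (prev, next_) else (next_, prev)
    let L := PySem.List.sorted sl.2 (fun x => x) false
    sl.1.foldl (fun total note => total + nearestDist L note) 0

-- ===== PRECONDITION & SPEC =====
def Spec_voice_leading_cost_py (prev : List Int) (next_ : List Int) (out : Int) : Prop := out = voice_leading_cost_py_alt prev next_
instance (prev : List Int) (next_ : List Int) (out : Int) : Decidable (Spec_voice_leading_cost_py prev next_ out) := by unfold Spec_voice_leading_cost_py; infer_instance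

-- ===== CLAIM (what is proved, stated in full; the proofs are below) =====
def Claim_equal_voice_leading_cost_py : Prop := ∀ (prev : List Int) (next_ : List Int), Dom_voice_leading_cost_py prev next_ → Spec_voice_leading_cost_py prev next_ (voice_leading_cost_py prev next_)

-- ===== LEMMAS AND PROOFS =====

-- For nonempty sorted L, nearestDist L note is attained by some element of L …
theorem nearestDist_attained (L : List Int) (note : Int)
    (hL : L ≠ []) (hs : L.Pairwise (· ≤ ·)) :
    ∃ e ∈ L, nearestDist L note = |e - note| := by
  obtain ⟨hlen, hlt, hge⟩ := PySem.List.bisectLeft_spec L note hs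
  set i := PySem.List.bisectLeft L note with hi
  have hLpos : 0 < L.length := List.length_pos_iff.mpr hL
  unfold nearestDist
  rw [← hi]
  by_cases h0 : 0 < i
  · have hi1 : i - 1 < L.length := by omega
    have hgd1 : L.getD (i-1) 0 = L[i-1] := List.getD_eq_getElem L 0 hi1
    have hlt1 : L[i-1] < note := hlt (i-1) hi1 (by omega)
    by_cases hil : i < L.length
    · have hgdi : L.getD i 0 = L[i] := List.getD_eq_getElem L 0 hil
      have hgei : note ≤ L[i] := hge i hil le_rfl
      simp only [if_pos hil, hgdi, hgd1]
      by_cases hc : note - L[i-1] < L[i] - note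
      · refine ⟨L[i-1], List.getElem_mem hi1, ?_⟩
        rw [if_pos (by simp [h0, hc])]
        simp [abs_of_nonpos (show L[i-1] - note ≤ 0 by omega)]
      · refine ⟨L[i], List.getElem_mem hil, ?_⟩
        rw [if_neg (by simp [h0, hc])]
        simp [abs_of_nonneg (show (0:Int) ≤ L[i] - note by omega)]
    · simp only [if_neg hil, hgd1]
      refine ⟨L[i-1], List.getElem_mem hi1, ?_⟩
      rw [if_pos (by simp [h0])]
      simp [abs_of_nonpos (show L[i-1] - note ≤ 0 by omega)]
  · have hil : i < L.length := by omega
    have hgdi : L.getD i 0 = L[i] := List.getD_eq_getElem L 0 hil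
    have hgei : note ≤ L[i] := hge i hil le_rfl
    simp only [if_pos hil, hgdi]
    refine ⟨L[i], List.getElem_mem hil, ?_⟩
    rw [if_neg (by simp [h0])]
    simp [abs_of_nonneg (show (0:Int) ≤ L[i] - note by omega)]

-- … and it is a lower bound for the distance to every element of L.
theorem nearestDist_isMin (L : List Int) (note : Int)
    (hs : L.Pairwise (· ≤ ·)) :
    ∀ l ∈ L, nearestDist L note ≤ |l - note| := by
  obtain ⟨hlen, hlt, hge⟩ := PySem.List.bisectLeft_spec L note hs
  set i := PySem.List.bisectLeft L note with hi
  have hmono : ∀ (p q : ℕ) (hp : p < L.length) (hq : q < L.length), p ≤ q → L[p] ≤ L[q] := by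
    intro p q hp hq hpq
    rcases Nat.lt_or_ge p q with h | h
    · exact (List.pairwise_iff_getElem.mp hs) p q hp hq h
    · have : p = q := by omega
      subst this; exact le_rfl
  intro l hl
  obtain ⟨j, hj, rfl⟩ := List.getElem_of_mem hl
  unfold nearestDist
  rw [← hi]
  rcases Nat.lt_or_ge j i with hji | hji
  · -- L[j] < note; compare through L[i-1]
    have h0 : 0 < i := by omega
    have hi1 : i - 1 < L.length := by omega
    have hgd1 : L.getD (i-1) 0 = L[i-1] := List.getD_eq_getElem L 0 hi1
    have hj1 : L[j] ≤ L[i-1] := hmono j (i-1) hj hi1 (by omega)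
    have hjlt : L[j] < note := hlt j hj hji
    rw [abs_of_nonpos (show L[j] - note ≤ 0 by omega)]
    by_cases hil : i < L.length
    · have hgdi : L.getD i 0 = L[i] := List.getD_eq_getElem L 0 hil
      simp only [if_pos hil, hgdi, hgd1]
      by_cases hc : note - L[i-1] < L[i] - note
      · rw [if_pos (by simp [h0, hc])]; simp; omega
      · rw [if_neg (by simp [h0, hc])]; simp; omega
    · simp only [if_neg hil, hgd1]
      rw [if_pos (by simp [h0])]; simp; omega
  · -- note ≤ L[j]; compare through L[i]
    have hil : i < L.length := by omega
    have hgdi : L.getD i 0 = L[i] := List.getD_eq_getElem L 0 hil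
    have hij : L[i] ≤ L[j] := hmono i j hil hj hji
    have hjge : note ≤ L[j] := hge j hj hji
    rw [abs_of_nonneg (show (0:Int) ≤ L[j] - note by omega)]
    simp only [if_pos hil, hgdi]
    by_cases h0 : 0 < i
    · have hi1 : i - 1 < L.length := by omega
      have hgd1 : L.getD (i-1) 0 = L[i-1] := List.getD_eq_getElem L 0 hi1
      have hlt1 : L[i-1] < note := hlt (i-1) hi1 (by omega)
      rw [hgd1]
      by_cases hc : note - L[i-1] < L[i] - note
      · rw [if_pos (by simp [h0, hc])]; simp; omega
      · rw [if_neg (by simp [h0, hc])]; simp; omega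
    · rw [if_neg (by simp [h0])]; simp; omega

-- per-note agreement: A's linear-scan contribution = B's bisect contribution
theorem per_note_eq (longer : List Int) (note : Int) (hne : longer ≠ []) :
    (match PySem.List.min? longer (fun n => |n - note|) with
      | some closest => |note - closest|
      | none => (0 : Int)) =
    nearestDist (PySem.List.sorted longer (fun x => x) false) note := by
  obtain ⟨c, hc⟩ : ∃ c, PySem.List.min? longer (fun n => |n - note|) = some c := by
    rcases h : PySem.List.min? longer (fun n => |n - note|) with _ | c
    · exact absurd ((PySem.List.min?_eq_none_iff _ _).mp h) hne
    · exact ⟨c, rfl⟩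
  rw [hc]
  set L := PySem.List.sorted longer (fun x => x) false with hLdef
  have hperm : L.Perm longer := PySem.List.sorted_perm longer (fun x => x) false
  have hs : L.Pairwise (· ≤ ·) := by
    have := PySem.List.sorted_pairwise longer (fun x => x)
    simpa using this
  have hLne : L ≠ [] := by
    intro h; rw [h] at hperm; exact hne (List.Perm.nil_eq hperm).symm
  have hcmem : c ∈ longer := PySem.List.min?_mem hc
  have hcmin : ∀ y ∈ longer, |c - note| ≤ |y - note| := PySem.List.min?_isMin hc
  obtain ⟨e, heL, hee⟩ := nearestDist_attained L note hLne hs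
  have h1 : nearestDist L note ≤ |note - c| := by
    have := nearestDist_isMin L note hs c (hperm.mem_iff.mpr hcmem)
    calc nearestDist L note ≤ |c - note| := this
      _ = |note - c| := abs_sub_comm c note
  have h2 : |note - c| ≤ nearestDist L note := by
    rw [hee]
    have := hcmin e (hperm.subset heL)
    calc |note - c| = |c - note| := abs_sub_comm note c
      _ ≤ |e - note| := this
  exact le_antisymm h2 h1

theorem foldl_body_eq (sh : List Int) (longer : List Int) (hne : longer ≠ []) (acc : Int) :
    sh.foldl (fun total note =>
      match PySem.List.min? longer (fun n => |n - note|) with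
      | some closest => total + |note - closest|
      | none => total) acc =
    sh.foldl (fun total note =>
      total + nearestDist (PySem.List.sorted longer (fun x => x) false) note) acc := by
  induction sh generalizing acc with
  | nil => rfl
  | cons x t ih =>
    simp only [List.foldl_cons]
    have hx := per_note_eq longer x hne
    rcases h : PySem.List.min? longer (fun n => |n - x|) with _ | c
    · exact absurd ((PySem.List.min?_eq_none_iff _ _).mp h) hne
    · simp only [h] at hx ⊢
      rw [hx]
      exact ih _

-- ===== VERDICT (by name: the statement is the Claim_ definition above) =====
theorem voice_leading_cost_py_spec : Claim_equal_voice_leading_cost_py := by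
  intro prev next_ _
  unfold Spec_voice_leading_cost_py voice_leading_cost_py voice_leading_cost_py_alt
  by_cases h0 : prev = [] ∨ next_ = []
  · simp [h0]
  · simp only [h0, if_false]
    push Not at h0
    by_cases h1 : prev.length = next_.length
    · simp [h1]
    · simp only [h1, if_false]
      by_cases h2 : prev.length ≤ next_.length
      · simp only [h2, if_true]
        exact foldl_body_eq prev next_ h0.2 0
      · simp only [h2, if_false]
        exact foldl_body_eq next_ prev h0.1 0
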